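-- pv_equiv track=rewrite | github.com/pjaskulski/shg_regesty | src/tools.py | get_text_with_year
-- ===== SOURCE A (Python) =====
-- def get_text_with_year(text: str) -> str:
--     """ zwraca początek tekstu z rokiem, latami"""
--     result = ''
--     znaki = '0123456789- ,aAn.[]'
--     for i in text:
--         if i in znaki:
--             result += i
--         else:
--             break
--
--     return result
-- ===== SOURCE B (Python) =====
-- def get_text_with_year(text: str) -> str:
--     """zwraca początek tekstu z rokiem, latami"""
--     znaki = '0123456789- ,aAn.[]'
--     n = next((i for i, c in enumerate(text) if c not in znaki), len(text))
--     return text[:n]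
-- ===== Notes on version B (the rewrite author's own statement) =====
-- stated objective: idiomatic
-- what changed: Instead of accumulating characters one by one until a break, B locates the index of the first character outside the allowed set (via enumerate/next) and returns a single slice of the input.
import Mathlib
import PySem

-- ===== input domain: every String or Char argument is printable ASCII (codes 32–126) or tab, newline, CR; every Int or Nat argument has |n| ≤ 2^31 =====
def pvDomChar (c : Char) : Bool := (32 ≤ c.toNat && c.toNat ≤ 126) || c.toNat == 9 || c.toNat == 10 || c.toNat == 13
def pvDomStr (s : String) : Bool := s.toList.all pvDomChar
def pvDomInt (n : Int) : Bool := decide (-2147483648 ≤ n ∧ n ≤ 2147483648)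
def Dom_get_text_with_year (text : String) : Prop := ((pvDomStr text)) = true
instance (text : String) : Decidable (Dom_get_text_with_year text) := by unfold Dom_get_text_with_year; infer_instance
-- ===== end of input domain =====

-- B replaces the accumulate-until-break loop by locating the first disallowed character and slicing the prefix (idiomatic, not measured faster).


-- ===== PORT A =====
-- A accumulates allowed characters one by one and stops at the first break.
def pvZnaki : List Char := "0123456789- ,aAn.[]".toList

def pvGoA : List Char → String → String
  | [], result => result
  | i :: rest, result =>
      if i ∈ pvZnaki then pvGoA rest (result.push i) else result

def get_text_with_year (text : String) : String := pvGoA text.toList ""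

-- ===== PORT B =====
-- B finds the index of the first character outside znaki and returns the slice text[:n].
def get_text_with_year_alt (text : String) : String :=
  let znaki : List Char := "0123456789- ,aAn.[]".toList
  let n : Int := ((text.toList.findIdx? (fun c => decide (c ∉ znaki))).getD text.toList.length : Nat)
  PySem.Str.slice text none (some n)

-- ===== PRECONDITION & SPEC =====
def Spec_get_text_with_year (text : String) (out : String) : Prop := out = get_text_with_year_alt text
instance (text : String) (out : String) : Decidable (Spec_get_text_with_year text out) := by unfold Spec_get_text_with_year; infer_instance

-- ===== CLAIM (what is proved, stated in full; the proofs are below) =====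
def Claim_equal_get_text_with_year : Prop := ∀ (text : String), Dom_get_text_with_year text → Spec_get_text_with_year text (get_text_with_year text)

-- ===== LEMMAS AND PROOFS =====

theorem pvGoA_toList (l : List Char) (acc : String) :
    (pvGoA l acc).toList = acc.toList ++ l.takeWhile (fun c => decide (c ∈ pvZnaki)) := by
  induction l generalizing acc with
  | nil => simp [pvGoA]
  | cons c rest ih =>
      simp only [pvGoA, List.takeWhile]
      by_cases h : c ∈ pvZnaki
      · simp [h, ih]
      · simp [h]

theorem pvFindIdx_take (p : Char → Bool) (l : List Char) :
    l.take ((l.findIdx? p).getD l.length) = l.takeWhile (fun c => !p c) := by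
  induction l with
  | nil => simp
  | cons c rest ih =>
      by_cases h : p c
      · simp [List.findIdx?_cons, h, List.takeWhile]
      · simp only [List.findIdx?_cons, h, List.takeWhile]
        cases hf : rest.findIdx? p with
        | none => simpa [hf] using congrArg (List.cons c) (by simpa [hf] using ih)
        | some k => simpa [hf] using congrArg (List.cons c) (by simpa [hf] using ih)

-- ===== VERDICT (by name: the statement is the Claim_ definition above) =====
theorem get_text_with_year_spec : Claim_equal_get_text_with_year := by
  intro text _
  unfold Spec_get_text_with_year get_text_with_year get_text_with_year_alt
  have key := pvFindIdx_take (fun c => decide (c ∉ pvZnaki)) text.toList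
  simp only [decide_not, Bool.not_not] at key
  have htl : (pvGoA text.toList "").toList
      = (PySem.Str.slice text none
          (some ((((text.toList.findIdx? (fun c => decide (c ∉ pvZnaki))).getD
              text.toList.length : Nat) : Int)))).toList := by
    rw [pvGoA_toList]
    simp only [PySem.Str.slice, PySem.Chars.slice, PySem.List.slice_to_natCast,
      String.toList_ofList, String.toList_empty, List.nil_append, decide_not]
    exact key.symm
  have := congrArg String.ofList htl
  simpa only [String.ofList_toList] using this
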